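-- pv_equiv track=rewrite | github.com/jaysen/py_play | HackerRank/intermediate/climbing_leaderboard.py | climbing_leaderboard_v2
-- ===== SOURCE A (Python) =====
-- def climbing_leaderboard_v2(ranked, player):
--     ranked = sorted(list(set(ranked)), reverse=True)
--     rankings = []
--     for score in player:
--         found = False
--         if score in ranked:
--             rankings.append(ranked.index(score) + 1)
--             continue
--         for i in range(len(ranked)):
--             if score > ranked[i]:
--                 rankings.append(i + 1)
--                 found = True
--                 break
--         if not found:
--             rankings.append(len(ranked) + 1)
--     return rankings
-- ===== SOURCE B (Python) =====
-- def climbing_leaderboard_v2(ranked, player):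
--     asc = sorted(set(ranked))
--     n = len(asc)
--     res = []
--     for score in player:
--         # bisect_right by hand (A imports nothing, so no bisect module)
--         lo, hi = 0, n
--         while lo < hi:
--             mid = (lo + hi) // 2
--             if score < asc[mid]:
--                 hi = mid
--             else:
--                 lo = mid + 1
--         res.append(n - lo + 1)
--     return res
-- ===== Notes on version B (the rewrite author's own statement) =====
-- stated objective: faster
-- what changed: Replaces the per-player linear membership test, list.index and linear scan over the descending leaderboard with a single ascending sort of the distinct scores plus a hand-written bisect_right binary search per player.
import Mathlib
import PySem

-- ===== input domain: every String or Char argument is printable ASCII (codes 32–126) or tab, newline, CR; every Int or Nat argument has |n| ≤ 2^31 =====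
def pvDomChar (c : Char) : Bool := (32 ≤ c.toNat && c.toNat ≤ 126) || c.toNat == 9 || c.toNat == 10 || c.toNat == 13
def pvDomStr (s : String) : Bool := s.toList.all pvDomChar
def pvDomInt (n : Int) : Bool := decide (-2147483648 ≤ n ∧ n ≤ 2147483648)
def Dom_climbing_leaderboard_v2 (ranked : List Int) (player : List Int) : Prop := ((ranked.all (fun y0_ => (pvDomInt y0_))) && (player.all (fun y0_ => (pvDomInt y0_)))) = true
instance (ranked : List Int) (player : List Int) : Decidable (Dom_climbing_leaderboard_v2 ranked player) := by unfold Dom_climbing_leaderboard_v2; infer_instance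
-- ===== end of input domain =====

-- B replaces A's per-player linear scans over the descending leaderboard with one ascending
-- sort of the distinct scores plus a bisect_right binary search per player (objective: faster).

-- ===== PORT A =====
-- inner loop of A: 'for i in range(len(ranked)): if score > ranked[i]: ... break' with running index i
def pvInnerA (score : Int) (d : List Int) (i : Nat) : Option Nat :=
  match d with
  | [] => none
  | x :: t => if score > x then some i else pvInnerA score t (i + 1)

-- body of A's 'for score in player' loop, on the sorted-descending deduplicated list d
def pvValA (d : List Int) (score : Int) : Int :=
  if score ∈ d then ((PySem.List.index? d score).getD 0 : Int) + 1
  else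
    match pvInnerA score d 0 with
    | some i => (i : Int) + 1
    | none => (d.length : Int) + 1

def climbing_leaderboard_v2 (ranked : List Int) (player : List Int) : List Int :=
  let d := PySem.List.sorted (PySem.Set.ofList ranked) (fun x => x) true
  player.foldl (fun rankings score => rankings ++ [pvValA d score]) []

-- ===== PORT B =====
-- Source B's hand-written bisect_right loop is exactly PySem.List.bisectRight (same lo/hi halving loop)
def climbing_leaderboard_v2_alt (ranked : List Int) (player : List Int) : List Int :=
  let asc := PySem.List.sorted (PySem.Set.ofList ranked) (fun x => x)
  let n := asc.length
  player.foldl (fun res score =>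
    res ++ [(n : Int) - (PySem.List.bisectRight asc score : Int) + 1]) []

-- ===== PRECONDITION & SPEC =====
def Spec_climbing_leaderboard_v2 (ranked : List Int) (player : List Int) (out : List Int) : Prop := out = climbing_leaderboard_v2_alt ranked player
instance (ranked : List Int) (player : List Int) (out : List Int) : Decidable (Spec_climbing_leaderboard_v2 ranked player out) := by unfold Spec_climbing_leaderboard_v2; infer_instance

-- ===== CLAIM (what is proved, stated in full; the proofs are below) =====
def Claim_equal_climbing_leaderboard_v2 : Prop := ∀ (ranked : List Int) (player : List Int), Dom_climbing_leaderboard_v2 ranked player → Spec_climbing_leaderboard_v2 ranked player (climbing_leaderboard_v2 ranked player)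

-- ===== LEMMAS AND PROOFS =====

lemma pvInnerA_shift (score : Int) (t : List Int) (i : Nat) :
    pvInnerA score t i = (pvInnerA score t 0).map (fun k => i + k) := by
  induction t generalizing i with
  | nil => simp [pvInnerA]
  | cons x t ih =>
    simp only [pvInnerA]
    split
    · simp
    · rw [ih (i + 1), ih 1]
      cases pvInnerA score t 0 with
      | none => simp
      | some k => simp; omega

-- A's per-score value is 1 + (number of distinct scores strictly above), on a strictly decreasing list
lemma pvValA_eq_countP (d : List Int) (score : Int) (hd : d.Pairwise (fun a b => b < a)) :
    pvValA d score = (d.countP (fun y => decide (score < y)) : Int) + 1 := by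
  induction d with
  | nil => simp [pvValA, pvInnerA]
  | cons x t ih =>
    rw [List.pairwise_cons] at hd
    obtain ⟨hx, ht⟩ := hd
    have iht := ih ht
    rcases lt_trichotomy score x with hlt | heq | hgt
    · -- score < x
      have hne : x ≠ score := by omega
      by_cases hmem : score ∈ t
      · -- member of tail: index path on both sides
        have hm : score ∈ x :: t := List.mem_cons_of_mem _ hmem
        obtain ⟨k, hk⟩ := Option.isSome_iff_exists.mp
          ((PySem.List.index?_isSome_iff t score).mpr hmem)
        rw [pvValA, if_pos hm, PySem.List.index?_cons_of_ne t hne, hk]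
        rw [pvValA, if_pos hmem, hk] at iht
        simp only [Option.map_some, Option.getD_some] at iht ⊢
        rw [List.countP_cons, if_pos (by simpa using hlt)]
        push_cast
        omega
      · -- not a member: inner-scan path on both sides
        have hm : score ∉ x :: t := by
          simp only [List.mem_cons, not_or]; exact ⟨by omega, hmem⟩
        rw [pvValA, if_neg hm]
        rw [pvValA, if_neg hmem] at iht
        simp only [pvInnerA, if_neg (by omega : ¬ score > x)]
        rw [pvInnerA_shift score t 1]
        rw [List.countP_cons, if_pos (by simpa using hlt)]
        cases h0 : pvInnerA score t 0 with
        | none => rw [h0] at iht; simp at iht ⊢; omega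
        | some i => rw [h0] at iht; simp at iht ⊢; omega
    · -- score = x : rank 1, nothing above
      subst heq
      have h0 : t.countP (fun y => decide (score < y)) = 0 := by
        apply List.countP_eq_zero.mpr
        intro y hy
        simpa using not_lt.mpr (le_of_lt (hx y hy))
      rw [pvValA, if_pos (List.mem_cons_self), PySem.List.index?_cons_self]
      rw [List.countP_cons, if_neg (by simp), h0]
      simp
    · -- score > x : rank 1 again
      have hm : score ∉ x :: t := by
        simp only [List.mem_cons, not_or]
        exact ⟨by omega, fun hmem => absurd (hx score hmem) (by omega)⟩
      have h0 : (x :: t).countP (fun y => decide (score < y)) = 0 := by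
        apply List.countP_eq_zero.mpr
        intro y hy
        rcases List.mem_cons.mp hy with rfl | hy
        · simpa using not_lt.mpr (le_of_lt hgt)
        · simpa using not_lt.mpr (le_of_lt (lt_trans (hx y hy) hgt))
      rw [pvValA, if_neg hm, h0]
      simp [pvInnerA, hgt]

-- B's per-score value: len - bisect_right = number of elements strictly above, on a strictly increasing list
lemma bisectRight_countP (asc : List Int) (score : Int) (h : asc.Pairwise (· < ·)) :
    asc.countP (fun y => decide (score < y)) = asc.length - PySem.List.bisectRight asc score := by
  obtain ⟨hle, hlo, hhi⟩ := PySem.List.bisectRight_spec asc score (h.imp le_of_lt)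
  set r := PySem.List.bisectRight asc score with hr
  conv_lhs => rw [← List.take_append_drop r asc]
  rw [List.countP_append]
  have h1 : (asc.take r).countP (fun y => decide (score < y)) = 0 := by
    apply List.countP_eq_zero.mpr
    intro y hy
    obtain ⟨j, hj, hjy⟩ := List.mem_iff_getElem.mp hy
    have hjr : j < r := lt_of_lt_of_le hj (by simp)
    have hjl : j < asc.length := lt_of_lt_of_le hjr hle
    rw [List.getElem_take] at hjy
    have := hlo j hjl hjr
    rw [hjy] at this
    simpa using not_lt.mpr this
  have h2 : (asc.drop r).countP (fun y => decide (score < y)) = (asc.drop r).length := by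
    apply List.countP_eq_length.mpr
    intro y hy
    obtain ⟨j, hj, hjy⟩ := List.mem_iff_getElem.mp hy
    rw [List.getElem_drop] at hjy
    have hjl : r + j < asc.length := by simp at hj; omega
    have := hhi (r + j) hjl (Nat.le_add_right _ _)
    rw [hjy] at this
    simpa using this
  rw [h1, h2, List.length_drop]
  omega

-- ===== VERDICT (by name: the statement is the Claim_ definition above) =====
theorem climbing_leaderboard_v2_spec : Claim_equal_climbing_leaderboard_v2 := by
  unfold Claim_equal_climbing_leaderboard_v2 Spec_climbing_leaderboard_v2
  intro ranked player _
  unfold climbing_leaderboard_v2 climbing_leaderboard_v2_alt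
  simp only
  rw [PySem.List.foldl_append_singleton_eq_map, PySem.List.foldl_append_singleton_eq_map]
  apply List.map_congr_left
  intro score _
  set d := PySem.List.sorted (PySem.Set.ofList ranked) (fun x => x) true with hdd
  set asc := PySem.List.sorted (PySem.Set.ofList ranked) (fun x => x) false with hasc
  have hascP : asc.Pairwise (· < ·) := PySem.List.sorted_ofList_pairwise_lt ranked
  have hdP : d.Pairwise (fun a b => b < a) := by
    have h1 : d.Pairwise (fun a b => b ≤ a) := PySem.List.sorted_pairwise_rev _ _
    have h2 : d.Nodup :=
      ((PySem.List.sorted_perm _ _ _).nodup_iff).mpr (PySem.Set.nodup_ofList ranked)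
    exact (h1.and h2).imp (fun ⟨hle, hne⟩ => lt_of_le_of_ne hle (Ne.symm hne))
  have hperm : d.Perm asc :=
    (PySem.List.sorted_perm _ _ _).trans (PySem.List.sorted_perm _ _ _).symm
  have hlen : d.length = asc.length := hperm.length_eq
  rw [pvValA_eq_countP d score hdP, hperm.countP_eq, bisectRight_countP asc score hascP]
  obtain ⟨hle, _, _⟩ := PySem.List.bisectRight_spec asc score (hascP.imp le_of_lt)
  push_cast [Nat.cast_sub hle]
  ring
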